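-- pv_equiv track=rewrite | github.com/michaelpeeri/rnafold-public | rnafold-tol.experimental_validation/codon_randomization.py | make_full_back_table
-- ===== SOURCE A (Python) =====
-- def make_full_back_table(forward_table):
--     ret = {}
--     for codon,aa in list(forward_table.items()):
--         codon = codon.lower()
--         if aa is None:
--             continue
--
--         if aa in ret:
--             ret[aa].append(codon)
--         else:
--             ret[aa] = [codon]
--     return ret
-- ===== SOURCE B (Python) =====
-- def make_full_back_table(forward_table):
--     # Filter/normalize once into (aa, codon) pairs, then group per first-seen key.
--     pairs = [(aa, codon.lower()) for codon, aa in forward_table.items() if aa is not None]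
--     keys = list(dict.fromkeys(aa for aa, _ in pairs))
--     return {k: [c for a, c in pairs if a == k] for k in keys}
-- ===== Notes on version B (the rewrite author's own statement) =====
-- stated objective: alternative
-- what changed: Replaces A's single accumulating-dict scan (conditional create-or-append per entry) with a three-stage pipeline: a filtered/lowercased pair list, an ordered key dedup via dict.fromkeys, and a per-key grouping comprehension.
import Mathlib
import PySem

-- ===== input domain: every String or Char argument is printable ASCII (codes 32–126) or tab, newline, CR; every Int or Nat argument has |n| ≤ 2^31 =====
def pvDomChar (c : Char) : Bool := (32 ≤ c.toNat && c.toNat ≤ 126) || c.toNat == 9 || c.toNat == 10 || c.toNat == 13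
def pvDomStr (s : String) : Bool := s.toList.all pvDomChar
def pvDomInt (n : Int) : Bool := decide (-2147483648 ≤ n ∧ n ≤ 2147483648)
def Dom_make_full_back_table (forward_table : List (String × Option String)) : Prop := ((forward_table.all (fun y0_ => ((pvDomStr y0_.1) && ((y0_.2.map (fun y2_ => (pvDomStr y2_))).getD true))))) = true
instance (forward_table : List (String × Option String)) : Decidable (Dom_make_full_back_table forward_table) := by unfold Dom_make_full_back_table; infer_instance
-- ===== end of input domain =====

-- B replaces A's accumulating-dict scan with a pairs-list / ordered-key-dedup / per-key-grouping pipeline (alternative decomposition, same results).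
-- Return-value equivalence only: A mutates no argument (it copies .items()), so side effects are not at issue.

-- ===== PORT A =====
def make_full_back_table (forward_table : List (String × Option String)) : List (String × List String) :=
  (forward_table.foldl
    (fun ret p =>
      let codon := PySem.Str.lower p.1
      match p.2 with
      | none => ret
      | some aa =>
        if ret.contains aa then
          ret.insert aa (ret.getD aa [] ++ [codon])   -- ret[aa].append(codon)
        else
          ret.insert aa [codon])
    (PySem.Dict.empty : PySem.Dict String (List String))).items

-- ===== PORT B =====
def make_full_back_table_alt (forward_table : List (String × Option String)) : List (String × List String) :=
  let pairs := forward_table.filterMap (fun p => p.2.map (fun aa => (aa, PySem.Str.lower p.1)))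
  let keys := PySem.List.dedup (pairs.map (fun q => q.1))
  keys.map (fun k => (k, (pairs.filter (fun q => q.1 == k)).map (fun q => q.2)))

-- ===== PRECONDITION & SPEC =====
def Spec_make_full_back_table (forward_table : List (String × Option String)) (out : List (String × List String)) : Prop := out = make_full_back_table_alt forward_table
instance (forward_table : List (String × Option String)) (out : List (String × List String)) : Decidable (Spec_make_full_back_table forward_table out) := by unfold Spec_make_full_back_table; infer_instance

-- ===== CLAIM (what is proved, stated in full; the proofs are below) =====
def Claim_equal_make_full_back_table : Prop := ∀ (forward_table : List (String × Option String)), Dom_make_full_back_table forward_table → Spec_make_full_back_table forward_table (make_full_back_table forward_table)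

-- ===== LEMMAS AND PROOFS =====

-- A's create-or-append branch is exactly a Dict.modify with default [].
theorem branch_eq_modify (d : PySem.Dict String (List String)) (k c : String) :
    (if d.contains k then d.insert k (d.getD k [] ++ [c]) else d.insert k [c])
      = d.modify k [] (fun x => x ++ [c]) := by
  by_cases h : d.contains k
  · simp [h, PySem.Dict.modify]
  · simp only [Bool.not_eq_true] at h
    simp [h, PySem.Dict.modify, PySem.Dict.getD_of_not_contains d [] h]

-- A's loop over forward_table equals the modify-loop over B's filtered pair list.
theorem foldA_eq_modify_fold (ft : List (String × Option String))
    (d : PySem.Dict String (List String)) :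
    ft.foldl
      (fun ret p =>
        let codon := PySem.Str.lower p.1
        match p.2 with
        | none => ret
        | some aa =>
          if ret.contains aa then
            ret.insert aa (ret.getD aa [] ++ [codon])
          else
            ret.insert aa [codon]) d
      = (ft.filterMap (fun p => p.2.map (fun aa => (aa, PySem.Str.lower p.1)))).foldl
          (fun d q => d.modify q.1 [] (fun x => x ++ [q.2])) d := by
  induction ft generalizing d with
  | nil => rfl
  | cons p rest ih =>
    cases h : p.2 with
    | none =>
      simp only [List.foldl_cons, List.filterMap_cons, h, Option.map_none]
      exact ih _
    | some aa =>
      simp only [List.foldl_cons, List.filterMap_cons, h, Option.map_some]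
      rw [branch_eq_modify, ih]

theorem make_full_back_table_eq_alt (ft : List (String × Option String)) :
    make_full_back_table ft = make_full_back_table_alt ft := by
  unfold make_full_back_table make_full_back_table_alt
  rw [foldA_eq_modify_fold]
  have hnd : ((ft.filterMap (fun p => p.2.map (fun aa => (aa, PySem.Str.lower p.1)))).foldl
      (fun d q => d.modify q.1 [] (fun x => x ++ [q.2]))
      (PySem.Dict.empty : PySem.Dict String (List String))).keys.Nodup :=
    PySem.Dict.nodup_keys_foldl_modify_key
      (ft.filterMap (fun p => p.2.map (fun aa => (aa, PySem.Str.lower p.1))))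
      (fun (q : String × String) => q.1) []
      (fun (_ : PySem.Dict String (List String)) (q : String × String) (x : List String) => x ++ [q.2])
      PySem.Dict.empty PySem.Dict.nodup_keys_empty
  rw [PySem.Dict.items_eq_map_keys _ hnd []]
  rw [PySem.Dict.keys_foldl_modify_key
      (ft.filterMap (fun p => p.2.map (fun aa => (aa, PySem.Str.lower p.1))))
      (fun (q : String × String) => q.1) []
      (fun (_ : PySem.Dict String (List String)) (q : String × String) (x : List String) => x ++ [q.2])]
  simp only [PySem.Dict.getD_foldl_modify_append, PySem.Dict.getD_empty, List.nil_append,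
    PySem.Dict.keys_empty, PySem.Set.update_nil_left, PySem.List.dedup_eq_ofList]

-- ===== VERDICT (by name: the statement is the Claim_ definition above) =====
theorem make_full_back_table_spec : Claim_equal_make_full_back_table := by
  intro ft _
  unfold Spec_make_full_back_table
  exact make_full_back_table_eq_alt ft
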